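-- pv_equiv track=rewrite | github.com/mirandavdende/advent-of-code-2023 | 18/solution.py | tims_draw_grid
-- ===== SOURCE A (Python) =====
-- def tims_draw_grid(cors):
--     # Collect dimensions
--     minX = min([cor[1] for cor in cors])
--     minY = min([cor[0] for cor in cors])
--     maxX = max([cor[1] for cor in cors])
--     maxY = max([cor[0] for cor in cors])
--     width = maxX - minX + 1
--     height = maxY - minY + 1
--
--     # Generate image
--     image = [['.' for _ in range(width)] for _ in range(height)]
--     for i in range(0, len(cors)-1):
--         start, end = cors[i:i+2]
--         y, x = start
--         dy = clamp(end[0] - start[0])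
--         dx = clamp(end[1] - start[1])
--         while x != end[1]+dx or y != end[0]+dy:
--             image[y-minY][x-minX] = "#"
--             x += dx
--             y += dy
--     return image
--
-- def clamp(value):
--     if value == 0:
--         return 0
--     if value > 0:
--         return 1
--     return -1
-- ===== SOURCE B (Python) =====
-- def tims_draw_grid(cors):
--     # Dimensions (min/max raise ValueError on empty input, like the original).
--     minX = min(cor[1] for cor in cors)
--     minY = min(cor[0] for cor in cors)
--     maxX = max(cor[1] for cor in cors)
--     maxY = max(cor[0] for cor in cors)
--     segs = list(zip(cors, cors[1:]))
--
--     # Validate the path up front: the renderer below assumes every segment is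
--     # axis-aligned or an exact 45-degree diagonal (the only paths the original
--     # draws without walking off the grid).
--     for (y0, x0), (y1, x1) in segs:
--         if y1 != y0 and x1 != x0 and abs(y1 - y0) != abs(x1 - x0):
--             raise ValueError("path segments must be axis-aligned or 45-degree diagonal")
--
--     def drawn(y, x):
--         # Closed-form point-on-segment test (bounding box + collinearity):
--         # no stepping along the segment at all.
--         for (y0, x0), (y1, x1) in segs:
--             if (min(y0, y1) <= y <= max(y0, y1)
--                     and min(x0, x1) <= x <= max(x0, x1)
--                     and (y - y0) * (x1 - x0) == (x - x0) * (y1 - y0)):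
--                 return True
--         return False
--
--     return [["#" if drawn(y, x) else "." for x in range(minX, maxX + 1)]
--             for y in range(minY, maxY + 1)]
-- ===== Notes on version B (the rewrite author's own statement) =====
-- stated objective: alternative
-- what changed: A walks each segment cell by cell with a clamp-step while-loop, mutating the grid as it goes; B never steps along segments at all: it renders each grid cell independently with a closed-form point-on-segment test (bounding box plus collinearity cross-product) against the list of consecutive coordinate pairs.
-- intended difference: On lists of length >= 2 whose points are all identical, A's while-loop exit test (x != end+dx or y != end+dy) is false immediately so the single cell stays '.', while B's point-on-segment test holds for the zero-length segment's endpoint and returns '#' there; drawing a zero-length path segment's point is the intended behaviour. — e.g. on tims_draw_grid([(0, 0), (0, 0)]): A returns [["."]], B returns [["#"]]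
import Mathlib
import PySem

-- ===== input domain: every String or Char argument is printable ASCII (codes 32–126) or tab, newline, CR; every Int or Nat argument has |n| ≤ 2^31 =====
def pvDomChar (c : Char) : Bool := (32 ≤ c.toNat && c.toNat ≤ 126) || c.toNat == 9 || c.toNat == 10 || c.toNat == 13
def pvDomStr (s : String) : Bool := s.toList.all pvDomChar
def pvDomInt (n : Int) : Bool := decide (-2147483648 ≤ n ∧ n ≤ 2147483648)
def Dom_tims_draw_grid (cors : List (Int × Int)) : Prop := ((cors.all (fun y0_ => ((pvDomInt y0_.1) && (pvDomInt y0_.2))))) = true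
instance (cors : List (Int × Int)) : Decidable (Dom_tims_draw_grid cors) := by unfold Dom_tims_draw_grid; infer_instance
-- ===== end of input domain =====

-- B replaces A's clamp-step while-loop walk (which mutates the grid cell by cell along each
-- segment) by a per-cell closed-form point-on-segment test (bounding box + collinearity) used
-- to render every grid cell independently; on all-identical coordinate lists (D_ below) B
-- intentionally draws the zero-length segment's point where A leaves '.'.


-- ===== PORT A =====
def pvClamp (value : Int) : Int :=
  if value = 0 then 0 else if value > 0 then 1 else -1

-- Python `image[r][c] = "#"`; exact whenever 0 ≤ r < height and 0 ≤ c < width —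
-- Pre_ guarantees every write of A is in range (out-of-range writes raise IndexError in Python).
def pvMark (img : List (List String)) (r c : Int) : List (List String) :=
  img.set r.toNat ((img.getD r.toNat []).set c.toNat "#")

-- the `while x != end[1]+dx or y != end[0]+dy: image[...]="#"; x+=dx; y+=dy` loop.
-- fuel only makes the recursion total: on Pre_ inputs |Δy|+|Δx|+1 strictly bounds the
-- iteration count (mismatched segments make A raise IndexError and are excluded by Pre_).
def pvWalk : Nat → List (List String) → Int → Int → Int → Int → Int → Int → Int → Int → List (List String)
  | 0, img, _, _, _, _, _, _, _, _ => img
  | fuel+1, img, y, x, ey, ex, dy, dx, mY, mX =>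
    if x ≠ ex + dx ∨ y ≠ ey + dy then
      pvWalk fuel (pvMark img (y - mY) (x - mX)) (y + dy) (x + dx) ey ex dy dx mY mX
    else img

def tims_draw_grid (cors : List (Int × Int)) : List (List String) :=
  match PySem.List.min? (cors.map (fun cor => cor.2)) (fun v => v),
        PySem.List.min? (cors.map (fun cor => cor.1)) (fun v => v),
        PySem.List.max? (cors.map (fun cor => cor.2)) (fun v => v),
        PySem.List.max? (cors.map (fun cor => cor.1)) (fun v => v) with
  | some minX, some minY, some maxX, some maxY =>
    let width := maxX - minX + 1
    let height := maxY - minY + 1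
    let image := (PySem.List.pyRange 0 height 1).map
      (fun _ => (PySem.List.pyRange 0 width 1).map (fun _ => "."))
    -- for i in range(0, len(cors)-1): start, end = cors[i:i+2]  (the two slice elements, fetched by index)
    (PySem.List.pyRange 0 ((cors.length : Int) - 1) 1).foldl (fun img i =>
      match PySem.List.pyGet? cors i, PySem.List.pyGet? cors (i + 1) with
      | some s, some e =>
        let dy := pvClamp (e.1 - s.1)
        let dx := pvClamp (e.2 - s.2)
        pvWalk ((e.1 - s.1).natAbs + (e.2 - s.2).natAbs + 1) img s.1 s.2 e.1 e.2 dy dx minY minX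
      | _, _ => img
    ) image
  | _, _, _, _ => []  -- min() of an empty sequence raises ValueError; excluded by Pre_

-- ===== PORT B =====
-- the closed-form point-on-segment test of Source B's `drawn` helper, for one segment:
-- bounding box and collinearity cross-product, no stepping
def pvOnSeg (s e : Int × Int) (y x : Int) : Bool :=
  decide (min s.1 e.1 ≤ y ∧ y ≤ max s.1 e.1) &&
  decide (min s.2 e.2 ≤ x ∧ x ≤ max s.2 e.2) &&
  ((y - s.1) * (e.2 - s.2) == (x - s.2) * (e.1 - s.1))

-- Source B's `drawn(y, x)`: True iff some consecutive pair's segment contains the cell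
def pvDrawn (segs : List ((Int × Int) × (Int × Int))) (y x : Int) : Bool :=
  segs.any (fun p => pvOnSeg p.1 p.2 y x)

def tims_draw_grid_alt (cors : List (Int × Int)) : List (List String) :=
  match PySem.List.min? (cors.map (fun cor => cor.2)) (fun v => v) with
  | none => []  -- min() of an empty sequence raises ValueError; excluded by Pre_
  | some minX =>
  match PySem.List.min? (cors.map (fun cor => cor.1)) (fun v => v) with
  | none => []
  | some minY =>
  match PySem.List.max? (cors.map (fun cor => cor.2)) (fun v => v) with
  | none => []
  | some maxX =>
  match PySem.List.max? (cors.map (fun cor => cor.1)) (fun v => v) with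
  | none => []
  | some maxY =>
    let segs := cors.zip cors.tail   -- list(zip(cors, cors[1:]))
    -- Source B's validation loop: ValueError on a segment neither axis-aligned nor 45°
    -- (raising inputs are excluded by Pre_; [] stands for the raise, never compared)
    if segs.any (fun p =>
        decide (p.2.1 ≠ p.1.1) && decide (p.2.2 ≠ p.1.2) &&
        decide (|p.2.1 - p.1.1| ≠ |p.2.2 - p.1.2|)) then []
    else
    (PySem.List.pyRange minY (maxY + 1) 1).map (fun y =>
      (PySem.List.pyRange minX (maxX + 1) 1).map (fun x =>
        if pvDrawn segs y x then "#" else "."))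

-- ===== PRECONDITION & SPEC =====
-- Pre_ excludes the empty list (min() raises ValueError) and any consecutive pair that is
-- neither axis-aligned nor an exact 45° diagonal (on those A's while-loop can never satisfy
-- its exit test, walks out of the grid and raises IndexError).
def Pre_tims_draw_grid (cors : List (Int × Int)) : Prop :=
  cors ≠ [] ∧ ∀ p ∈ cors.zip cors.tail,
    p.2.1 - p.1.1 = 0 ∨ p.2.2 - p.1.2 = 0 ∨ |p.2.1 - p.1.1| = |p.2.2 - p.1.2|
instance (cors : List (Int × Int)) : Decidable (Pre_tims_draw_grid cors) := by
  unfold Pre_tims_draw_grid; infer_instance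
def pvWitness_tims_draw_grid : (List (Int × Int)) := [(0, 0), (2, 2), (2, 0)]

-- On lists of length ≥ 2 whose points are all identical, A's while-loop exit test
-- (x != end+dx or y != end+dy) is false immediately, so the single cell stays '.'; B's
-- point-on-segment test holds for the zero-length segment's endpoint and returns '#' there,
-- which is the intended behaviour for path drawing.
def D_tims_draw_grid (cors : List (Int × Int)) : Prop :=
  2 ≤ cors.length ∧ ∀ p ∈ cors, ∀ q ∈ cors, p = q
instance (cors : List (Int × Int)) : Decidable (D_tims_draw_grid cors) := by
  unfold D_tims_draw_grid; infer_instance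

def Spec_tims_draw_grid (cors : List (Int × Int)) (out : List (List String)) : Prop :=
  ¬ D_tims_draw_grid cors → out = tims_draw_grid_alt cors
instance (cors : List (Int × Int)) (out : List (List String)) : Decidable (Spec_tims_draw_grid cors out) := by
  unfold Spec_tims_draw_grid; infer_instance

def pvDiffWitness_tims_draw_grid : (List (Int × Int)) := [(0, 0), (0, 0)]
def pvDiffWitnessOut_tims_draw_grid : (List (List String)) × (List (List String)) :=
  ([["."]], [["#"]])

-- ===== CLAIM (what is proved, stated in full; the proofs are below) =====
def Claim_unchanged_tims_draw_grid : Prop := ∀ (cors : List (Int × Int)), Dom_tims_draw_grid cors → Pre_tims_draw_grid cors → Spec_tims_draw_grid cors (tims_draw_grid cors)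
def Claim_changed_tims_draw_grid : Prop := Dom_tims_draw_grid (pvDiffWitness_tims_draw_grid) ∧ Pre_tims_draw_grid (pvDiffWitness_tims_draw_grid) ∧ D_tims_draw_grid (pvDiffWitness_tims_draw_grid) ∧ tims_draw_grid (pvDiffWitness_tims_draw_grid) = pvDiffWitnessOut_tims_draw_grid.1 ∧ tims_draw_grid_alt (pvDiffWitness_tims_draw_grid) = pvDiffWitnessOut_tims_draw_grid.2 ∧ pvDiffWitnessOut_tims_draw_grid.1 ≠ pvDiffWitnessOut_tims_draw_grid.2
def Claim_exact_tims_draw_grid : Prop := ∀ (cors : List (Int × Int)), Dom_tims_draw_grid cors → Pre_tims_draw_grid cors → D_tims_draw_grid cors → tims_draw_grid cors ≠ tims_draw_grid_alt cors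

-- ===== LEMMAS AND PROOFS =====

-- proof-side abstraction: the list of lattice points of one segment
def pvSegPoints (s e : Int × Int) : List (Int × Int) :=
  (List.range (max (e.1 - s.1).natAbs (e.2 - s.2).natAbs + 1)).map
    (fun (k : Nat) => (s.1 + (k : Int) * pvClamp (e.1 - s.1), s.2 + (k : Int) * pvClamp (e.2 - s.2)))

def pvMarkP (mY mX : Int) (img : List (List String)) (p : Int × Int) : List (List String) :=
  pvMark img (p.1 - mY) (p.2 - mX)

theorem pvWalk_done (fuel : Nat) (img : List (List String)) (y x ey ex dy dx mY mX : Int)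
    (hx : x = ex + dx) (hy : y = ey + dy) :
    pvWalk fuel img y x ey ex dy dx mY mX = img := by
  cases fuel with
  | zero => rfl
  | succ f => simp [pvWalk, hx, hy]

theorem pvWalk_eq_foldl (n : Nat) : ∀ (fuel : Nat) (img : List (List String)) (y0 x0 sy sx mY mX : Int),
    n + 1 ≤ fuel → (sy ≠ 0 ∨ sx ≠ 0) →
    pvWalk fuel img y0 x0 (y0 + n * sy) (x0 + n * sx) sy sx mY mX
      = ((List.range (n + 1)).map (fun (k : Nat) => (y0 + (k : Int) * sy, x0 + (k : Int) * sx))).foldl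
          (pvMarkP mY mX) img := by
  induction n with
  | zero =>
    intro fuel img y0 x0 sy sx mY mX hf hs
    obtain ⟨f, rfl⟩ : ∃ f, fuel = f + 1 := ⟨fuel - 1, by omega⟩
    have hcond : x0 ≠ x0 + (0:Nat) * sx + sx ∨ y0 ≠ y0 + (0:Nat) * sy + sy := by
      rcases hs with h | h
      · right; simp; omega
      · left; simp; omega
    simp only [pvWalk, if_pos hcond]
    rw [pvWalk_done]
    · simp [pvMarkP]
    · push_cast; ring
    · push_cast; ring
  | succ n ih =>
    intro fuel img y0 x0 sy sx mY mX hf hs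
    obtain ⟨f, rfl⟩ : ∃ f, fuel = f + 1 := ⟨fuel - 1, by omega⟩
    have hcond : x0 ≠ x0 + ((n:Nat)+1 : Nat) * sx + sx ∨ y0 ≠ y0 + ((n:Nat)+1 : Nat) * sy + sy := by
      rcases hs with h | h
      · right; push_cast; intro hc
        have h0 : ((n:Int)+2) * sy = 0 := by linarith
        rcases mul_eq_zero.mp h0 with h2 | h2
        · omega
        · exact h h2
      · left; push_cast; intro hc
        have h0 : ((n:Int)+2) * sx = 0 := by linarith
        rcases mul_eq_zero.mp h0 with h2 | h2
        · omega
        · exact h h2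
    simp only [pvWalk, if_pos hcond]
    have heq : y0 + ((n:Nat)+1 : Nat) * sy = (y0 + sy) + (n:Nat) * sy := by push_cast; ring
    have heq2 : x0 + ((n:Nat)+1 : Nat) * sx = (x0 + sx) + (n:Nat) * sx := by push_cast; ring
    rw [heq, heq2, ih f _ _ _ _ _ _ _ (by omega) hs]
    conv_rhs => rw [show n + 1 + 1 = (n + 1) + 1 from rfl, List.range_succ_eq_map,
      List.map_cons, List.foldl_cons, List.map_map]
    congr 1
    · simp [pvMarkP]
    · apply List.map_congr_left
      intro k hk
      simp only [Function.comp_apply, Nat.succ_eq_add_one, Prod.mk.injEq]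
      constructor <;> (push_cast; ring)

theorem pvClamp_mul_natAbs (d : Int) : (d.natAbs : Int) * pvClamp d = d := by
  unfold pvClamp; split_ifs <;> omega

theorem pvClamp_trichotomy (d : Int) :
    (d = 0 ∧ pvClamp d = 0) ∨ (0 < d ∧ pvClamp d = 1) ∨ (d < 0 ∧ pvClamp d = -1) := by
  unfold pvClamp
  split_ifs with h1 h2
  · exact Or.inl ⟨h1, rfl⟩
  · exact Or.inr (Or.inl ⟨h2, rfl⟩)
  · exact Or.inr (Or.inr ⟨by omega, rfl⟩)

theorem pvSeg_target (s e : Int × Int)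
    (hpre : e.1 - s.1 = 0 ∨ e.2 - s.2 = 0 ∨ |e.1 - s.1| = |e.2 - s.2|) :
    e.1 = s.1 + ((max (e.1 - s.1).natAbs (e.2 - s.2).natAbs : Nat) : Int) * pvClamp (e.1 - s.1) ∧
    e.2 = s.2 + ((max (e.1 - s.1).natAbs (e.2 - s.2).natAbs : Nat) : Int) * pvClamp (e.2 - s.2) := by
  have hpre' : e.1 - s.1 = 0 ∨ e.2 - s.2 = 0 ∨ (e.1 - s.1).natAbs = (e.2 - s.2).natAbs := by
    rcases hpre with h | h | h
    · exact Or.inl h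
    · exact Or.inr (Or.inl h)
    · rw [Int.abs_eq_natAbs, Int.abs_eq_natAbs] at h
      exact Or.inr (Or.inr (by exact_mod_cast h))
  constructor
  · rcases hpre' with h | h | h
    · have hc0 : pvClamp (e.1 - s.1) = 0 := by unfold pvClamp; simp [h]
      rw [hc0, mul_zero]; omega
    · have hnn : max (e.1 - s.1).natAbs (e.2 - s.2).natAbs = (e.1 - s.1).natAbs := by omega
      rw [hnn, pvClamp_mul_natAbs]; omega
    · have hnn : max (e.1 - s.1).natAbs (e.2 - s.2).natAbs = (e.1 - s.1).natAbs := by omega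
      rw [hnn, pvClamp_mul_natAbs]; omega
  · rcases hpre' with h | h | h
    · have hnn : max (e.1 - s.1).natAbs (e.2 - s.2).natAbs = (e.2 - s.2).natAbs := by omega
      rw [hnn, pvClamp_mul_natAbs]; omega
    · have hc0 : pvClamp (e.2 - s.2) = 0 := by unfold pvClamp; simp [h]
      rw [hc0, mul_zero]; omega
    · have hnn : max (e.1 - s.1).natAbs (e.2 - s.2).natAbs = (e.2 - s.2).natAbs := by omega
      rw [hnn, pvClamp_mul_natAbs]; omega

theorem pvWalk_seg (s e : Int × Int) (img : List (List String)) (mY mX : Int)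
    (hpre : e.1 - s.1 = 0 ∨ e.2 - s.2 = 0 ∨ |e.1 - s.1| = |e.2 - s.2|) (hne : s ≠ e) :
    pvWalk ((e.1 - s.1).natAbs + (e.2 - s.2).natAbs + 1) img s.1 s.2 e.1 e.2
        (pvClamp (e.1 - s.1)) (pvClamp (e.2 - s.2)) mY mX
      = (pvSegPoints s e).foldl (pvMarkP mY mX) img := by
  set n : Nat := max (e.1 - s.1).natAbs (e.2 - s.2).natAbs with hn
  obtain ⟨hy, hx⟩ := pvSeg_target s e hpre
  have hs : pvClamp (e.1 - s.1) ≠ 0 ∨ pvClamp (e.2 - s.2) ≠ 0 := by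
    have : e.1 - s.1 ≠ 0 ∨ e.2 - s.2 ≠ 0 := by
      by_contra hc
      push_neg at hc
      exact hne (Prod.ext (by omega) (by omega))
    rcases this with h | h
    · left; unfold pvClamp; split_ifs <;> omega
    · right; unfold pvClamp; split_ifs <;> omega
  calc pvWalk ((e.1 - s.1).natAbs + (e.2 - s.2).natAbs + 1) img s.1 s.2 e.1 e.2
        (pvClamp (e.1 - s.1)) (pvClamp (e.2 - s.2)) mY mX
      = pvWalk ((e.1 - s.1).natAbs + (e.2 - s.2).natAbs + 1) img s.1 s.2
          (s.1 + (n : Int) * pvClamp (e.1 - s.1)) (s.2 + (n : Int) * pvClamp (e.2 - s.2))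
          (pvClamp (e.1 - s.1)) (pvClamp (e.2 - s.2)) mY mX := by rw [← hy, ← hx]
    _ = _ := by
        rw [pvWalk_eq_foldl n _ _ _ _ _ _ _ _ (by omega) hs]
        rfl

theorem pvFold_idx_zip {β : Type} (g : β → (Int × Int) → (Int × Int) → β) :
    ∀ (l : List (Int × Int)) (b : β),
    (PySem.List.pyRange 0 ((l.length : Int) - 1) 1).foldl (fun acc i =>
      match PySem.List.pyGet? l i, PySem.List.pyGet? l (i + 1) with
      | some s, some e => g acc s e
      | _, _ => acc) b
    = (l.zip l.tail).foldl (fun acc p => g acc p.1 p.2) b := by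
  have key : ∀ (l : List (Int × Int)) (b : β),
      (List.range (l.length - 1)).foldl (fun acc k =>
        match l[k]?, l[k+1]? with
        | some s, some e => g acc s e
        | _, _ => acc) b
      = (l.zip l.tail).foldl (fun acc p => g acc p.1 p.2) b := by
    intro l
    induction l with
    | nil => intro b; rfl
    | cons a t ih =>
      intro b
      cases t with
      | nil => rfl
      | cons a' t' =>
        simp only [List.length_cons, Nat.add_sub_cancel, List.tail_cons, List.zip_cons_cons,
          List.foldl_cons, List.range_succ_eq_map, List.foldl_map]
        rw [show (a :: a' :: t')[0]? = some a from rfl, show (a :: a' :: t')[1]? = some a' from rfl]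
        have := ih (g b a a')
        simp only [List.length_cons, Nat.add_sub_cancel, List.tail_cons] at this
        rw [← this]
        apply PySem.List.foldl_congr_mem
        intro acc k hk
        simp [Nat.succ_eq_add_one, List.getElem?_cons_succ]
  intro l b
  cases l with
  | nil => simp [PySem.List.pyRange_one_eq_nil]
  | cons a t =>
    have hlen : ((a :: t).length : Int) - 1 = ((a :: t).length - 1 : Nat) := by
      simp
    rw [hlen, PySem.List.pyRange_zero_natCast, List.foldl_map, ← key (a :: t) b]
    apply PySem.List.foldl_congr_mem
    intro acc k hk
    have h1 : PySem.List.pyGet? (a :: t) (k : Int) = (a :: t)[k]? := PySem.List.pyGet?_natCast _ _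
    have h2 : PySem.List.pyGet? (a :: t) ((k : Int) + 1) = (a :: t)[k+1]? := by
      rw [show ((k : Int) + 1) = ((k + 1 : Nat) : Int) by push_cast; ring, PySem.List.pyGet?_natCast]
    rw [h1, h2]

def pvIsRender (minY minX maxY maxX : Int) (pts : List (Int × Int)) (g : List (List String)) : Prop :=
  g.length = (maxY + 1 - minY).toNat ∧
  ∀ i : Nat, i < (maxY + 1 - minY).toNat →
    ∃ row, g[i]? = some row ∧ row.length = (maxX + 1 - minX).toNat ∧
      ∀ j : Nat, j < (maxX + 1 - minX).toNat →
        row[j]? = some (if (minY + (i : Int), minX + (j : Int)) ∈ pts then "#" else ".")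

theorem pvIsRender_dots (minY minX maxY maxX : Int) :
    pvIsRender minY minX maxY maxX []
      ((PySem.List.pyRange 0 (maxY - minY + 1) 1).map
        (fun _ => (PySem.List.pyRange 0 (maxX - minX + 1) 1).map (fun _ => "."))) := by
  have hH : (maxY - minY + 1 - 0).toNat = (maxY + 1 - minY).toNat := by omega
  have hW : (maxX - minX + 1 - 0).toNat = (maxX + 1 - minX).toNat := by omega
  refine ⟨by simp [PySem.List.pyRange_one]; omega, ?_⟩
  intro i hi
  refine ⟨(PySem.List.pyRange 0 (maxX - minX + 1) 1).map (fun _ => "."), ?_, ?_, ?_⟩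
  · rw [List.getElem?_map, PySem.List.getElem?_pyRange_one]
    rw [hH, if_pos hi]
    rfl
  · simp [PySem.List.pyRange_one]; omega
  · intro j hj
    rw [List.getElem?_map, PySem.List.getElem?_pyRange_one, hW, if_pos hj]
    simp

theorem pvIsRender_mark (minY minX maxY maxX : Int) (pts : List (Int × Int)) (g : List (List String))
    (p : Int × Int) (h : pvIsRender minY minX maxY maxX pts g)
    (h1 : minY ≤ p.1) (h2 : p.1 ≤ maxY) (h3 : minX ≤ p.2) (h4 : p.2 ≤ maxX) :
    pvIsRender minY minX maxY maxX (pts ++ [p]) (pvMarkP minY minX g p) := by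
  obtain ⟨hlen, hrows⟩ := h
  have hr : (p.1 - minY).toNat < (maxY + 1 - minY).toNat := by omega
  have hc : (p.2 - minX).toNat < (maxX + 1 - minX).toNat := by omega
  obtain ⟨prow, hgr, hrl, hrj⟩ := hrows (p.1 - minY).toNat hr
  have hglen : (p.1 - minY).toNat < g.length := by omega
  have hgetD : g.getD (p.1 - minY).toNat [] = prow := by
    rw [List.getD_eq_getElem?_getD, hgr]; rfl
  constructor
  · simp [pvMarkP, pvMark, hlen]
  · intro i hi
    by_cases hieq : i = (p.1 - minY).toNat
    · subst hieq
      refine ⟨prow.set (p.2 - minX).toNat "#", ?_, ?_, ?_⟩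
      · simp only [pvMarkP, pvMark, hgetD, List.getElem?_set]
        simp [hglen]
      · simp [hrl]
      · intro j hj
        by_cases hjeq : j = (p.2 - minX).toNat
        · subst hjeq
          have hjlen : (p.2 - minX).toNat < prow.length := by omega
          rw [List.getElem?_set, if_pos rfl, if_pos hjlen]
          have hee : (minY + ((p.1 - minY).toNat : Int), minX + ((p.2 - minX).toNat : Int)) = p := by
            have e1 : minY + ((p.1 - minY).toNat : Int) = p.1 := by omega
            have e2 : minX + ((p.2 - minX).toNat : Int) = p.2 := by omega
            rw [e1, e2]
          rw [if_pos (by simp only [List.mem_append, List.mem_singleton]; right; exact hee)]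
        · rw [List.getElem?_set, if_neg (fun hcon => hjeq hcon.symm), hrj j hj]
          have hne : (minY + ((p.1 - minY).toNat : Int), minX + (j : Int)) ≠ p := by
            intro hcon
            apply hjeq
            have := congrArg Prod.snd hcon
            simp at this
            omega
          simp only [List.mem_append, List.mem_singleton, hne, or_false]
    · obtain ⟨row, hgr', hrl', hrj'⟩ := hrows i hi
      refine ⟨row, ?_, hrl', ?_⟩
      · simp only [pvMarkP, pvMark, List.getElem?_set]
        rw [if_neg (fun hcon => hieq hcon.symm), hgr']
      · intro j hj
        rw [hrj' j hj]
        have hne : (minY + (i : Int), minX + (j : Int)) ≠ p := by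
          intro hcon
          apply hieq
          have := congrArg Prod.fst hcon
          simp at this
          omega
        simp only [List.mem_append, List.mem_singleton, hne, or_false]

theorem pvIsRender_foldl (minY minX maxY maxX : Int) (l : List (Int × Int)) :
    ∀ (pts : List (Int × Int)) (g : List (List String)),
    pvIsRender minY minX maxY maxX pts g →
    (∀ p ∈ l, minY ≤ p.1 ∧ p.1 ≤ maxY ∧ minX ≤ p.2 ∧ p.2 ≤ maxX) →
    pvIsRender minY minX maxY maxX (pts ++ l) (l.foldl (pvMarkP minY minX) g) := by
  induction l with
  | nil => intro pts g h _; simpa using h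
  | cons p l ih =>
    intro pts g h hbox
    have hp := hbox p (List.mem_cons_self)
    have := ih (pts ++ [p]) (pvMarkP minY minX g p)
      (pvIsRender_mark _ _ _ _ _ _ _ h hp.1 hp.2.1 hp.2.2.1 hp.2.2.2)
      (fun q hq => hbox q (List.mem_cons_of_mem _ hq))
    simpa [List.append_assoc] using this

theorem pvIsRender_ext (minY minX maxY maxX : Int) (pts pts' : List (Int × Int))
    (g g' : List (List String)) (h : pvIsRender minY minX maxY maxX pts g)
    (h' : pvIsRender minY minX maxY maxX pts' g')
    (hmem : ∀ q, q ∈ pts ↔ q ∈ pts') : g = g' := by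
  obtain ⟨hl, hr⟩ := h
  obtain ⟨hl', hr'⟩ := h'
  apply List.ext_getElem?
  intro i
  by_cases hi : i < (maxY + 1 - minY).toNat
  · obtain ⟨row, hg, hrl, hrj⟩ := hr i hi
    obtain ⟨row', hg', hrl', hrj'⟩ := hr' i hi
    rw [hg, hg']
    congr 1
    apply List.ext_getElem?
    intro j
    by_cases hj : j < (maxX + 1 - minX).toNat
    · rw [hrj j hj, hrj' j hj]; simp only [hmem]
    · rw [List.getElem?_eq_none (by omega), List.getElem?_eq_none (by omega)]
  · rw [List.getElem?_eq_none (by omega), List.getElem?_eq_none (by omega)]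

theorem pvSegPoints_bounds (s e q : Int × Int)
    (hpre : e.1 - s.1 = 0 ∨ e.2 - s.2 = 0 ∨ |e.1 - s.1| = |e.2 - s.2|)
    (hq : q ∈ pvSegPoints s e) :
    (min s.1 e.1 ≤ q.1 ∧ q.1 ≤ max s.1 e.1) ∧ (min s.2 e.2 ≤ q.2 ∧ q.2 ≤ max s.2 e.2) := by
  unfold pvSegPoints at hq
  simp only [List.mem_map, List.mem_range] at hq
  obtain ⟨k, hk, rfl⟩ := hq
  obtain ⟨hT1, hT2⟩ := pvSeg_target s e hpre
  constructor
  · rcases pvClamp_trichotomy (e.1 - s.1) with ⟨h, hc⟩ | ⟨h, hc⟩ | ⟨h, hc⟩ <;>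
      rw [hc] at hT1 ⊢ <;>
      simp only [mul_zero, mul_one, mul_neg_one] at hT1 ⊢ <;> omega
  · rcases pvClamp_trichotomy (e.2 - s.2) with ⟨h, hc⟩ | ⟨h, hc⟩ | ⟨h, hc⟩ <;>
      rw [hc] at hT2 ⊢ <;>
      simp only [mul_zero, mul_one, mul_neg_one] at hT2 ⊢ <;> omega

theorem pvSegPoints_left (s e : Int × Int) : s ∈ pvSegPoints s e := by
  unfold pvSegPoints
  simp only [List.mem_map, List.mem_range]
  exact ⟨0, by omega, by simp⟩

theorem pvSegPoints_right (s e : Int × Int)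
    (hpre : e.1 - s.1 = 0 ∨ e.2 - s.2 = 0 ∨ |e.1 - s.1| = |e.2 - s.2|) :
    e ∈ pvSegPoints s e := by
  unfold pvSegPoints
  simp only [List.mem_map, List.mem_range]
  obtain ⟨hT1, hT2⟩ := pvSeg_target s e hpre
  refine ⟨max (e.1 - s.1).natAbs (e.2 - s.2).natAbs, by omega, ?_⟩
  rw [← hT1, ← hT2]

theorem pvSegPoints_self (s : Int × Int) : pvSegPoints s s = [s] := by
  simp [pvSegPoints, pvClamp]

-- the closed-form test of B characterises exactly the lattice points A's walk visits
theorem pvOnSeg_iff (s e : Int × Int) (y x : Int)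
    (hpre : e.1 - s.1 = 0 ∨ e.2 - s.2 = 0 ∨ |e.1 - s.1| = |e.2 - s.2|) :
    pvOnSeg s e y x = true ↔ (y, x) ∈ pvSegPoints s e := by
  set n : Nat := max (e.1 - s.1).natAbs (e.2 - s.2).natAbs with hn
  obtain ⟨hT1, hT2⟩ := pvSeg_target s e hpre
  constructor
  · intro h
    simp only [pvOnSeg, Bool.and_eq_true, decide_eq_true_eq, beq_iff_eq] at h
    obtain ⟨⟨⟨hb1, hb2⟩, hb3, hb4⟩, hcross⟩ := h
    unfold pvSegPoints
    simp only [List.mem_map, List.mem_range]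
    rcases pvClamp_trichotomy (e.1 - s.1) with ⟨hdy, hcy⟩ | ⟨hdy, hcy⟩ | ⟨hdy, hcy⟩ <;>
      rcases pvClamp_trichotomy (e.2 - s.2) with ⟨hdx, hcx⟩ | ⟨hdx, hcx⟩ | ⟨hdx, hcx⟩ <;>
      rw [hcy] at hT1 ⊢ <;> rw [hcx] at hT2 ⊢ <;>
      simp only [mul_zero, mul_one, mul_neg_one] at hT1 hT2 ⊢
    -- case (0,0): the single point
    · refine ⟨0, by omega, ?_⟩
      simp only [Nat.cast_zero, mul_zero, add_zero, Prod.mk.injEq]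
      constructor <;> omega
    -- case (0,+): horizontal
    · refine ⟨(x - s.2).natAbs, by omega, ?_⟩
      simp only [Prod.mk.injEq]
      constructor <;> omega
    -- case (0,-)
    · refine ⟨(x - s.2).natAbs, by omega, ?_⟩
      simp only [Prod.mk.injEq]
      constructor <;> omega
    -- case (+,0): vertical
    · refine ⟨(y - s.1).natAbs, by omega, ?_⟩
      simp only [Prod.mk.injEq]
      constructor <;> omega
    -- case (+,+): diagonal; cancel the cross product
    · have hdd : e.1 - s.1 = e.2 - s.2 := by
        rcases hpre with h | h | h
        · omega
        · omega
        · rw [abs_of_pos hdy, abs_of_pos hdx] at h; omega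
      have h0 : (y - s.1 - (x - s.2)) * (e.2 - s.2) = 0 := by
        rw [hdd] at hcross; linear_combination hcross
      have hlin : y - s.1 = x - s.2 := by
        rcases mul_eq_zero.mp h0 with h' | h' <;> omega
      refine ⟨(y - s.1).natAbs, by omega, ?_⟩
      simp only [Prod.mk.injEq]
      constructor <;> omega
    -- case (+,-): anti-diagonal
    · have hdd : e.1 - s.1 = -(e.2 - s.2) := by
        rcases hpre with h | h | h
        · omega
        · omega
        · rw [abs_of_pos hdy, abs_of_neg hdx] at h; omega
      have h0 : (y - s.1 + (x - s.2)) * (e.2 - s.2) = 0 := by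
        rw [hdd] at hcross; linear_combination hcross
      have hlin : y - s.1 = -(x - s.2) := by
        rcases mul_eq_zero.mp h0 with h' | h' <;> omega
      refine ⟨(y - s.1).natAbs, by omega, ?_⟩
      simp only [Prod.mk.injEq]
      constructor <;> omega
    -- case (-,0)
    · refine ⟨(y - s.1).natAbs, by omega, ?_⟩
      simp only [Prod.mk.injEq]
      constructor <;> omega
    -- case (-,+)
    · have hdd : e.1 - s.1 = -(e.2 - s.2) := by
        rcases hpre with h | h | h
        · omega
        · omega
        · rw [abs_of_neg hdy, abs_of_pos hdx] at h; omega
      have h0 : (y - s.1 + (x - s.2)) * (e.2 - s.2) = 0 := by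
        rw [hdd] at hcross; linear_combination hcross
      have hlin : y - s.1 = -(x - s.2) := by
        rcases mul_eq_zero.mp h0 with h' | h' <;> omega
      refine ⟨(x - s.2).natAbs, by omega, ?_⟩
      simp only [Prod.mk.injEq]
      constructor <;> omega
    -- case (-,-)
    · have hdd : e.1 - s.1 = e.2 - s.2 := by
        rcases hpre with h | h | h
        · omega
        · omega
        · rw [abs_of_neg hdy, abs_of_neg hdx] at h; omega
      have h0 : (y - s.1 - (x - s.2)) * (e.2 - s.2) = 0 := by
        rw [hdd] at hcross; linear_combination hcross
      have hlin : y - s.1 = x - s.2 := by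
        rcases mul_eq_zero.mp h0 with h' | h' <;> omega
      refine ⟨(y - s.1).natAbs, by omega, ?_⟩
      simp only [Prod.mk.injEq]
      constructor <;> omega
  · intro hmem
    obtain ⟨⟨hb1, hb2⟩, hb3, hb4⟩ := pvSegPoints_bounds s e (y, x) hpre hmem
    unfold pvSegPoints at hmem
    simp only [List.mem_map, List.mem_range] at hmem
    obtain ⟨k, hk, hq⟩ := hmem
    rw [Prod.mk.injEq] at hq
    obtain ⟨hq1, hq2⟩ := hq
    simp only [pvOnSeg, Bool.and_eq_true, decide_eq_true_eq, beq_iff_eq]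
    refine ⟨⟨⟨hb1, hb2⟩, hb3, hb4⟩, ?_⟩
    obtain ⟨cy, hcy⟩ : ∃ c, pvClamp (e.1 - s.1) = c := ⟨_, rfl⟩
    obtain ⟨cx, hcx⟩ : ∃ c, pvClamp (e.2 - s.2) = c := ⟨_, rfl⟩
    obtain ⟨N, hN⟩ : ∃ m : Nat, max (e.1 - s.1).natAbs (e.2 - s.2).natAbs = m := ⟨_, rfl⟩
    rw [hcy] at hT1 hq1
    rw [hcx] at hT2 hq2
    rw [hN] at hT1 hT2
    subst hq1
    subst hq2
    rw [hT1, hT2]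
    ring

def pvPtsB (cors : List (Int × Int)) : List (Int × Int) :=
  (cors.zip cors.tail).flatMap (fun p => pvSegPoints p.1 p.2)

def pvPtsA (cors : List (Int × Int)) : List (Int × Int) :=
  (cors.zip cors.tail).flatMap (fun p => if p.1 = p.2 then [] else pvSegPoints p.1 p.2)

theorem pvDrawn_iff (cors : List (Int × Int)) (hpre : Pre_tims_draw_grid cors) (y x : Int) :
    pvDrawn (cors.zip cors.tail) y x = true ↔ (y, x) ∈ pvPtsB cors := by
  unfold pvDrawn pvPtsB
  rw [List.any_eq_true]
  simp only [List.mem_flatMap]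
  constructor
  · rintro ⟨p, hp, hseg⟩
    exact ⟨p, hp, (pvOnSeg_iff p.1 p.2 y x (hpre.2 p hp)).mp hseg⟩
  · rintro ⟨p, hp, hmem⟩
    exact ⟨p, hp, (pvOnSeg_iff p.1 p.2 y x (hpre.2 p hp)).mpr hmem⟩

theorem pvIncident : ∀ (l : List (Int × Int)) (v : Int × Int), v ∈ l → (∃ w ∈ l, w ≠ v) →
    ∃ p ∈ l.zip l.tail, p.1 ≠ p.2 ∧ (p.1 = v ∨ p.2 = v) := by
  intro l
  induction l with
  | nil => intro v hv; simp at hv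
  | cons a t ih =>
    intro v hv hw
    cases t with
    | nil =>
      obtain ⟨w, hwmem, hwne⟩ := hw
      simp at hwmem hv
      exact absurd (hwmem.trans hv.symm) hwne
    | cons b t' =>
      by_cases hab : a = b
      · -- degenerate head pair; recurse into the tail
        have hvt : v ∈ b :: t' := by
          rcases List.mem_cons.mp hv with h | h
          · rw [h, hab]; exact List.mem_cons_self
          · exact h
        have hwt : ∃ w ∈ b :: t', w ≠ v := by
          obtain ⟨w, hwmem, hwne⟩ := hw
          rcases List.mem_cons.mp hwmem with h | h
          · exact ⟨b, List.mem_cons_self, by rw [← hab, ← h]; exact hwne⟩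
          · exact ⟨w, h, hwne⟩
        obtain ⟨p, hp, hpne, hpv⟩ := ih v hvt hwt
        exact ⟨p, by simp only [List.tail_cons, List.zip_cons_cons]; exact List.mem_cons_of_mem _ hp, hpne, hpv⟩
      · by_cases hva : v = a
        · exact ⟨(a, b), by simp, hab, Or.inl hva.symm⟩
        · by_cases hvb : v = b
          · exact ⟨(a, b), by simp, hab, Or.inr hvb.symm⟩
          · have hvt : v ∈ b :: t' := by
              rcases List.mem_cons.mp hv with h | h
              · exact absurd h hva
              · exact h
            obtain ⟨p, hp, hpne, hpv⟩ := ih v hvt ⟨b, List.mem_cons_self, fun h => hvb h.symm⟩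
            exact ⟨p, by simp only [List.tail_cons, List.zip_cons_cons]; exact List.mem_cons_of_mem _ hp, hpne, hpv⟩

theorem pvPts_mem_eq (cors : List (Int × Int)) (hpre : Pre_tims_draw_grid cors)
    (hD : ¬ D_tims_draw_grid cors) : ∀ q, q ∈ pvPtsA cors ↔ q ∈ pvPtsB cors := by
  intro q
  unfold pvPtsA pvPtsB
  simp only [List.mem_flatMap]
  constructor
  · rintro ⟨p, hp, hq⟩
    refine ⟨p, hp, ?_⟩
    by_cases h : p.1 = p.2
    · simp [h] at hq
    · simpa [h] using hq
  · rintro ⟨p, hp, hq⟩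
    by_cases h : p.1 = p.2
    · -- degenerate pair: q is its single point; find a non-degenerate pair incident to it
      rw [← h, pvSegPoints_self] at hq
      have hq1 : q = p.1 := by simpa using hq
      have hqm : q ∈ cors := by rw [hq1]; exact (List.of_mem_zip hp).1
      have hlen : 2 ≤ cors.length := by
        have h2 := (List.of_mem_zip hp).2
        cases cors with
        | nil => simp at hqm
        | cons a t =>
          cases t with
          | nil => simp at h2
          | cons b t' => simp
      have hnc : ∃ w ∈ cors, w ≠ q := by
        by_contra hc
        push_neg at hc
        exact hD ⟨hlen, fun a ha b hb => by rw [hc a ha, hc b hb]⟩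
      obtain ⟨pr, hpr, hprne, hprv⟩ := pvIncident cors q hqm hnc
      refine ⟨pr, hpr, ?_⟩
      rw [if_neg hprne]
      rcases hprv with h1 | h1
      · rw [← h1]; exact pvSegPoints_left _ _
      · rw [← h1]; exact pvSegPoints_right _ _ (hpre.2 pr hpr)
    · exact ⟨p, hp, by simp [h, hq]⟩

theorem pvA_eq_fold (cors : List (Int × Int)) (minX minY maxX maxY : Int)
    (hpre : Pre_tims_draw_grid cors)
    (e1 : PySem.List.min? (cors.map (fun cor => cor.2)) (fun v => v) = some minX)
    (e2 : PySem.List.min? (cors.map (fun cor => cor.1)) (fun v => v) = some minY)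
    (e3 : PySem.List.max? (cors.map (fun cor => cor.2)) (fun v => v) = some maxX)
    (e4 : PySem.List.max? (cors.map (fun cor => cor.1)) (fun v => v) = some maxY) :
    tims_draw_grid cors
      = (pvPtsA cors).foldl (pvMarkP minY minX)
          ((PySem.List.pyRange 0 (maxY - minY + 1) 1).map
            (fun _ => (PySem.List.pyRange 0 (maxX - minX + 1) 1).map (fun _ => "."))) := by
  unfold tims_draw_grid
  rw [e1, e2, e3, e4]
  simp only
  rw [pvFold_idx_zip (fun acc s e =>
    pvWalk ((e.1 - s.1).natAbs + (e.2 - s.2).natAbs + 1) acc s.1 s.2 e.1 e.2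
      (pvClamp (e.1 - s.1)) (pvClamp (e.2 - s.2)) minY minX) cors]
  unfold pvPtsA
  rw [List.foldl_flatMap]
  apply PySem.List.foldl_congr_mem
  intro acc p hp
  by_cases h : p.1 = p.2
  · rw [if_pos h]
    simp only [List.foldl_nil]
    apply pvWalk_done
    · have : pvClamp (p.2.2 - p.1.2) = 0 := by rw [h]; simp [pvClamp]
      rw [this, h, add_zero]
    · have : pvClamp (p.2.1 - p.1.1) = 0 := by rw [h]; simp [pvClamp]
      rw [this, h, add_zero]
  · rw [if_neg h]
    exact pvWalk_seg p.1 p.2 acc minY minX (hpre.2 p hp) h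

theorem pvPts_in_box (cors : List (Int × Int)) (minX minY maxX maxY : Int)
    (hpre : Pre_tims_draw_grid cors)
    (e1 : PySem.List.min? (cors.map (fun cor => cor.2)) (fun v => v) = some minX)
    (e2 : PySem.List.min? (cors.map (fun cor => cor.1)) (fun v => v) = some minY)
    (e3 : PySem.List.max? (cors.map (fun cor => cor.2)) (fun v => v) = some maxX)
    (e4 : PySem.List.max? (cors.map (fun cor => cor.1)) (fun v => v) = some maxY) :
    ∀ p ∈ pvPtsB cors, minY ≤ p.1 ∧ p.1 ≤ maxY ∧ minX ≤ p.2 ∧ p.2 ≤ maxX := by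
  intro q hq
  unfold pvPtsB at hq
  simp only [List.mem_flatMap] at hq
  obtain ⟨p, hp, hq⟩ := hq
  obtain ⟨hs, he'⟩ := List.of_mem_zip hp
  have he := List.mem_of_mem_tail he'
  have b1 : minY ≤ p.1.1 := PySem.List.min?_isMin e2 p.1.1 (List.mem_map.mpr ⟨p.1, hs, rfl⟩)
  have b2 : minY ≤ p.2.1 := PySem.List.min?_isMin e2 p.2.1 (List.mem_map.mpr ⟨p.2, he, rfl⟩)
  have b3 : p.1.1 ≤ maxY := PySem.List.max?_isMax e4 p.1.1 (List.mem_map.mpr ⟨p.1, hs, rfl⟩)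
  have b4 : p.2.1 ≤ maxY := PySem.List.max?_isMax e4 p.2.1 (List.mem_map.mpr ⟨p.2, he, rfl⟩)
  have b5 : minX ≤ p.1.2 := PySem.List.min?_isMin e1 p.1.2 (List.mem_map.mpr ⟨p.1, hs, rfl⟩)
  have b6 : minX ≤ p.2.2 := PySem.List.min?_isMin e1 p.2.2 (List.mem_map.mpr ⟨p.2, he, rfl⟩)
  have b7 : p.1.2 ≤ maxX := PySem.List.max?_isMax e3 p.1.2 (List.mem_map.mpr ⟨p.1, hs, rfl⟩)
  have b8 : p.2.2 ≤ maxX := PySem.List.max?_isMax e3 p.2.2 (List.mem_map.mpr ⟨p.2, he, rfl⟩)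
  obtain ⟨⟨c1, c2⟩, c3, c4⟩ := pvSegPoints_bounds p.1 p.2 q (hpre.2 p hp) hq
  refine ⟨by omega, by omega, by omega, by omega⟩

theorem pvPtsA_sub (cors : List (Int × Int)) : ∀ q ∈ pvPtsA cors, q ∈ pvPtsB cors := by
  intro q hq
  unfold pvPtsA at hq
  unfold pvPtsB
  simp only [List.mem_flatMap] at hq ⊢
  obtain ⟨p, hp, hq⟩ := hq
  by_cases h : p.1 = p.2
  · simp [h] at hq
  · exact ⟨p, hp, by simpa [h] using hq⟩

theorem pvA_isRender (cors : List (Int × Int)) (minX minY maxX maxY : Int)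
    (hpre : Pre_tims_draw_grid cors)
    (e1 : PySem.List.min? (cors.map (fun cor => cor.2)) (fun v => v) = some minX)
    (e2 : PySem.List.min? (cors.map (fun cor => cor.1)) (fun v => v) = some minY)
    (e3 : PySem.List.max? (cors.map (fun cor => cor.2)) (fun v => v) = some maxX)
    (e4 : PySem.List.max? (cors.map (fun cor => cor.1)) (fun v => v) = some maxY) :
    pvIsRender minY minX maxY maxX (pvPtsA cors) (tims_draw_grid cors) := by
  rw [pvA_eq_fold cors minX minY maxX maxY hpre e1 e2 e3 e4]
  have := pvIsRender_foldl minY minX maxY maxX (pvPtsA cors) []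
    ((PySem.List.pyRange 0 (maxY - minY + 1) 1).map
      (fun _ => (PySem.List.pyRange 0 (maxX - minX + 1) 1).map (fun _ => ".")))
    (pvIsRender_dots minY minX maxY maxX)
    (fun p hp => pvPts_in_box cors minX minY maxX maxY hpre e1 e2 e3 e4 p (pvPtsA_sub cors p hp))
  simpa using this

theorem pvAlt_isRender (cors : List (Int × Int)) (minX minY maxX maxY : Int)
    (hpre : Pre_tims_draw_grid cors)
    (e1 : PySem.List.min? (cors.map (fun cor => cor.2)) (fun v => v) = some minX)
    (e2 : PySem.List.min? (cors.map (fun cor => cor.1)) (fun v => v) = some minY)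
    (e3 : PySem.List.max? (cors.map (fun cor => cor.2)) (fun v => v) = some maxX)
    (e4 : PySem.List.max? (cors.map (fun cor => cor.1)) (fun v => v) = some maxY) :
    pvIsRender minY minX maxY maxX (pvPtsB cors) (tims_draw_grid_alt cors) := by
  unfold tims_draw_grid_alt
  rw [e1, e2, e3, e4]
  simp only
  have hval : (cors.zip cors.tail).any (fun p =>
      decide (p.2.1 ≠ p.1.1) && decide (p.2.2 ≠ p.1.2) &&
      decide (|p.2.1 - p.1.1| ≠ |p.2.2 - p.1.2|)) = false := by
    rw [List.any_eq_false]
    intro p hp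
    have h := hpre.2 p hp
    intro hc
    simp only [Bool.and_eq_true, decide_eq_true_eq] at hc
    obtain ⟨⟨h1, h2⟩, h3⟩ := hc
    rcases h with h' | h' | h'
    · exact h1 (by omega)
    · exact h2 (by omega)
    · exact h3 h'
  rw [if_neg (by rw [hval]; simp)]
  constructor
  · rw [List.length_map, PySem.List.length_pyRange_one]
  · intro i hi
    refine ⟨(PySem.List.pyRange minX (maxX + 1) 1).map
      (fun x => if pvDrawn (cors.zip cors.tail) (minY + (i : Int)) x then "#" else "."), ?_, ?_, ?_⟩
    · rw [List.getElem?_map, PySem.List.getElem?_pyRange_one, if_pos hi]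
      rfl
    · rw [List.length_map, PySem.List.length_pyRange_one]
    · intro j hj
      rw [List.getElem?_map, PySem.List.getElem?_pyRange_one, if_pos hj]
      simp only [Option.map_some]
      congr 1
      by_cases hb : pvDrawn (cors.zip cors.tail) (minY + (i : Int)) (minX + (j : Int)) = true
      · rw [if_pos hb, if_pos ((pvDrawn_iff cors hpre _ _).mp hb)]
      · rw [if_neg hb, if_neg (fun hmem => hb ((pvDrawn_iff cors hpre _ _).mpr hmem))]

theorem pvExtrema (cors : List (Int × Int)) (hne : cors ≠ []) :
    ∃ minX minY maxX maxY,
      PySem.List.min? (cors.map (fun cor => cor.2)) (fun v => v) = some minX ∧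
      PySem.List.min? (cors.map (fun cor => cor.1)) (fun v => v) = some minY ∧
      PySem.List.max? (cors.map (fun cor => cor.2)) (fun v => v) = some maxX ∧
      PySem.List.max? (cors.map (fun cor => cor.1)) (fun v => v) = some maxY := by
  have g1 : ∀ (f : Int × Int → Int), ∃ v, PySem.List.min? (cors.map f) (fun v => v) = some v := by
    intro f
    cases h : PySem.List.min? (cors.map f) (fun v => v) with
    | none => exact absurd (by simpa using (PySem.List.min?_eq_none_iff _ _).mp h) hne
    | some v => exact ⟨v, rfl⟩
  have g2 : ∀ (f : Int × Int → Int), ∃ v, PySem.List.max? (cors.map f) (fun v => v) = some v := by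
    intro f
    cases h : PySem.List.max? (cors.map f) (fun v => v) with
    | none => exact absurd (by simpa using (PySem.List.max?_eq_none_iff _ _).mp h) hne
    | some v => exact ⟨v, rfl⟩
  obtain ⟨a, ha⟩ := g1 (fun cor => cor.2)
  obtain ⟨b, hb⟩ := g1 (fun cor => cor.1)
  obtain ⟨c, hc⟩ := g2 (fun cor => cor.2)
  obtain ⟨d, hd⟩ := g2 (fun cor => cor.1)
  exact ⟨a, b, c, d, ha, hb, hc, hd⟩

theorem tims_final (cors : List (Int × Int)) (hpre : Pre_tims_draw_grid cors)
    (hD : ¬ D_tims_draw_grid cors) : tims_draw_grid cors = tims_draw_grid_alt cors := by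
  obtain ⟨minX, minY, maxX, maxY, e1, e2, e3, e4⟩ := pvExtrema cors hpre.1
  exact pvIsRender_ext minY minX maxY maxX (pvPtsA cors) (pvPtsB cors) _ _
    (pvA_isRender cors minX minY maxX maxY hpre e1 e2 e3 e4)
    (pvAlt_isRender cors minX minY maxX maxY hpre e1 e2 e3 e4)
    (pvPts_mem_eq cors hpre hD)

theorem tims_tight (cors : List (Int × Int)) (hpre : Pre_tims_draw_grid cors)
    (hD : D_tims_draw_grid cors) : tims_draw_grid cors ≠ tims_draw_grid_alt cors := by
  intro hcontra
  obtain ⟨hlen, hconst⟩ := hD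
  obtain ⟨minX, minY, maxX, maxY, e1, e2, e3, e4⟩ := pvExtrema cors hpre.1
  have hA := pvA_isRender cors minX minY maxX maxY hpre e1 e2 e3 e4
  have hB := pvAlt_isRender cors minX minY maxX maxY hpre e1 e2 e3 e4
  cases cors with
  | nil => exact hpre.1 rfl
  | cons q t =>
  cases t with
  | nil => simp at hlen
  | cons q2 t' =>
  have hq : q ∈ q :: q2 :: t' := List.mem_cons_self
  have hmY : minY = q.1 := by
    obtain ⟨p, hp, hpe⟩ := List.mem_map.mp (PySem.List.min?_mem e2)
    rw [← hpe, hconst p hp q hq]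
  have hmX : minX = q.2 := by
    obtain ⟨p, hp, hpe⟩ := List.mem_map.mp (PySem.List.min?_mem e1)
    rw [← hpe, hconst p hp q hq]
  have hMY : maxY = q.1 := by
    obtain ⟨p, hp, hpe⟩ := List.mem_map.mp (PySem.List.max?_mem e4)
    rw [← hpe, hconst p hp q hq]
  have hMX : maxX = q.2 := by
    obtain ⟨p, hp, hpe⟩ := List.mem_map.mp (PySem.List.max?_mem e3)
    rw [← hpe, hconst p hp q hq]
  have hH : 0 < (maxY + 1 - minY).toNat := by omega
  have hW : 0 < (maxX + 1 - minX).toNat := by omega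
  obtain ⟨rowA, hga, hla, hja⟩ := hA.2 0 hH
  obtain ⟨rowB, hgb, hlb, hjb⟩ := hB.2 0 hH
  have cA := hja 0 hW
  have cB := hjb 0 hW
  have hrow : rowA = rowB := by
    rw [hcontra, hgb] at hga
    exact (Option.some.inj hga).symm
  have hnotin : (minY + ((0 : Nat) : Int), minX + ((0 : Nat) : Int)) ∉ pvPtsA (q :: q2 :: t') := by
    intro hin
    unfold pvPtsA at hin
    simp only [List.mem_flatMap] at hin
    obtain ⟨p, hp, hq'⟩ := hin
    have hpp : p.1 = p.2 := by
      obtain ⟨h1, h2⟩ := List.of_mem_zip hp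
      exact hconst p.1 h1 p.2 (List.mem_of_mem_tail h2)
    simp [hpp] at hq'
  have hin : (minY + ((0 : Nat) : Int), minX + ((0 : Nat) : Int)) ∈ pvPtsB (q :: q2 :: t') := by
    unfold pvPtsB
    simp only [List.mem_flatMap]
    refine ⟨(q, q2), by simp, ?_⟩
    have hqq : (minY + ((0 : Nat) : Int), minX + ((0 : Nat) : Int)) = q := by
      have : q = (q.1, q.2) := rfl
      rw [this]
      simp [hmY, hmX]
    rw [hqq]
    exact pvSegPoints_left q q2
  rw [hrow, cB, if_pos hin] at cA
  rw [if_neg hnotin] at cA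
  have : "#" = "." := Option.some.inj cA
  simp at this

-- ===== VERDICT (by name: the statement is the Claim_ definition above) =====
theorem tims_draw_grid_spec : Claim_unchanged_tims_draw_grid := by
  intro cors _ hpre hD
  exact tims_final cors hpre hD

theorem tims_draw_grid_changed : Claim_changed_tims_draw_grid := by
  unfold Claim_changed_tims_draw_grid; decide

theorem tims_draw_grid_tight : Claim_exact_tims_draw_grid := by
  intro cors _ hpre hD
  exact tims_tight cors hpre hD
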